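-- pv_equiv track=rewrite | github.com/bhofmei/analysis-scripts | methyl/ma_analysis/epigenotyping-old/epigenotyping_pe_v7.2.py | undoTransformation
-- ===== SOURCE A (Python) =====
-- def undoTransformation( transformation ):
-- 	outDict = {}
-- 	for i in range(len(transformation)):
-- 		t = transformation[i]
-- 		if i != t: # bin was replaced
-- 			# if not in dict, add
-- 			if outDict.get( t ) == None:
-- 				outDict[t] = []
-- 			outDict[t] += [ i ]
-- 	# end for i
-- 	return outDict
-- ===== SOURCE B (Python) =====
-- def undoTransformation(transformation):
--     # mismatched positions as (target, index) pairs, in index order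
--     mism = [(t, i) for i, t in enumerate(transformation) if i != t]
--     # distinct targets in first-occurrence order
--     keys = list(dict.fromkeys(t for t, _ in mism))
--     # one grouped pass per key
--     return {t: [i for x, i in mism if x == t] for t in keys}
-- ===== Notes on version B (the rewrite author's own statement) =====
-- stated objective: alternative
-- what changed: Replaces A's incremental dict-building single scan (check-then-append per element) with a collect/dedup/group strategy: build the mismatched (target,index) pair list once, dedup the targets, then emit each group with a comprehension per key.
import Mathlib
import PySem

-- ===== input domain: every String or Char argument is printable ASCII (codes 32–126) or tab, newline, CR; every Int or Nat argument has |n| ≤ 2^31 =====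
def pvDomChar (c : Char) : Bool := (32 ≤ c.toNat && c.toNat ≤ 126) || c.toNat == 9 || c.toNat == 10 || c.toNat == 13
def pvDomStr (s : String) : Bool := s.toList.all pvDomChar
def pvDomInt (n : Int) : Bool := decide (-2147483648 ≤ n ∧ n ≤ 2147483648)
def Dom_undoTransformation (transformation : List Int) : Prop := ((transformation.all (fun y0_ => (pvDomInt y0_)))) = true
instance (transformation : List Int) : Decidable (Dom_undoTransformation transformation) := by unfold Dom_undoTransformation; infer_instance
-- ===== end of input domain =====

-- B replaces A's incremental dict-building scan by a collect/dedup/group pass; equal return value, 'alternative' objective.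

-- ===== PORT A =====
-- literal port of A's loop: for i in range(len(..)): t = ..[i]; if i != t: if get(t) is None: d[t]=[]; d[t] += [i]
def undoTransformation (transformation : List Int) : List (Int × List Int) :=
  let d : PySem.Dict Int (List Int) :=
    (PySem.List.pyRange 0 (PySem.List.len transformation) 1).foldl
      (fun d i =>
        let t := PySem.List.pyGetD transformation i 0
        if i ≠ t then
          let d := if d.get? t = none then d.insert t [] else d
          d.insert t (d.getD t [] ++ [i])
        else d)
      PySem.Dict.empty
  d.items

-- ===== PORT B =====
def undoTransformation_alt (transformation : List Int) : List (Int × List Int) :=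
  let mism := (PySem.List.enumerate transformation).filterMap
      (fun p => if p.1 ≠ p.2 then some (p.2, p.1) else none)
  let keys := PySem.List.dedup (mism.map Prod.fst)
  keys.map (fun t => (t, (mism.filter (fun q => q.1 == t)).map Prod.snd))

-- ===== PRECONDITION & SPEC =====
def Spec_undoTransformation (transformation : List Int) (out : List (Int × List Int)) : Prop := out = undoTransformation_alt transformation
instance (transformation : List Int) (out : List (Int × List Int)) : Decidable (Spec_undoTransformation transformation out) := by unfold Spec_undoTransformation; infer_instance

-- ===== CLAIM (what is proved, stated in full; the proofs are below) =====
def Claim_equal_undoTransformation : Prop := ∀ (transformation : List Int), Dom_undoTransformation transformation → Spec_undoTransformation transformation (undoTransformation transformation)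

-- ===== LEMMAS AND PROOFS =====

-- A's loop body (ensure-key then append) is exactly Dict.modify t [] (· ++ [i])
lemma stepA_eq_modify (d : PySem.Dict Int (List Int)) (i t : Int) :
    (let d := if d.get? t = none then d.insert t [] else d
     d.insert t (d.getD t [] ++ [i])) = d.modify t [] (fun v => v ++ [i]) := by
  by_cases hc : d.get? t = none
  · simp only [if_pos hc, PySem.Dict.getD_insert_self, PySem.Dict.insert_insert_self,
      List.nil_append, PySem.Dict.modify, PySem.Dict.getD_of_get?_eq_none d [] hc]
  · simp only [if_neg hc, PySem.Dict.modify]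

-- folding a guarded step over a list is folding the step over the filterMap'd pairs
lemma foldl_filterMap (l : List (Int × Int)) (d : PySem.Dict Int (List Int)) :
    l.foldl (fun d p => if p.1 ≠ p.2 then d.modify p.2 [] (fun v => v ++ [p.1]) else d) d
      = (l.filterMap (fun p => if p.1 ≠ p.2 then some (p.2, p.1) else none)).foldl
          (fun d q => d.modify q.1 [] (fun v => v ++ [q.2])) d := by
  induction l generalizing d with
  | nil => rfl
  | cons x xs ih =>
    simp only [List.foldl_cons, List.filterMap_cons]
    by_cases h : x.1 = x.2
    · rw [if_neg (by simp [h]), if_neg (by simp [h])]; exact ih d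
    · rw [if_pos (by simp [h]), if_pos (by simp [h])]; exact ih _

-- ===== VERDICT (by name: the statement is the Claim_ definition above) =====
theorem undoTransformation_spec : Claim_equal_undoTransformation := by
  intro xs _
  show undoTransformation xs = undoTransformation_alt xs
  unfold undoTransformation undoTransformation_alt
  set mism := (PySem.List.enumerate xs).filterMap
      (fun p => if p.1 ≠ p.2 then some (p.2, p.1) else none) with hmism
  set F := mism.foldl (fun d q => d.modify q.1 [] (fun v => v ++ [q.2]))
      (PySem.Dict.empty : PySem.Dict Int (List Int)) with hF
  have h1 : (PySem.List.pyRange 0 (PySem.List.len xs) 1).foldl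
      (fun (d : PySem.Dict Int (List Int)) i =>
        let t := PySem.List.pyGetD xs i 0
        if i ≠ t then
          let d := if d.get? t = none then d.insert t [] else d
          d.insert t (d.getD t [] ++ [i])
        else d)
      PySem.Dict.empty = F := by
    have he := PySem.List.enumerate_eq_map_pyRange xs 0
    rw [hF, hmism]
    rw [← foldl_filterMap, he, List.foldl_map]
    apply PySem.List.foldl_congr_mem
    intro d i _
    dsimp only
    by_cases h : i ≠ PySem.List.pyGetD xs i 0
    · rw [if_pos h, if_pos h]
      exact stepA_eq_modify d i _
    · rw [if_neg h, if_neg h]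
  rw [h1]
  have hnd : F.keys.Nodup := by
    rw [hF]
    exact PySem.Dict.nodup_keys_foldl_modify_key mism Prod.fst []
      (fun _ q => fun v => v ++ [q.2]) PySem.Dict.empty (by simp)
  rw [PySem.Dict.items_eq_map_keys F hnd []]
  have hkeys : F.keys = PySem.List.dedup (mism.map Prod.fst) := by
    rw [hF, PySem.Dict.keys_foldl_modify_key]
    simp [PySem.Set.update_nil_left]
  rw [hkeys]
  apply List.map_congr_left
  intro t _
  have hg : F.getD t [] = (mism.filter (fun p => p.1 == t)).map (fun p => p.2) := by
    rw [hF, PySem.Dict.getD_foldl_modify_append]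
    simp
  rw [hg]
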